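-- pv_equiv track=rewrite | github.com/kilb/routerX | src/utils/typosquat.py | is_typosquat
-- ===== SOURCE A (Python) =====
-- KNOWN_TYPOSQUATS: dict[str, str] = {
--     # PyPI historical (removed) — see PyPI typosquat research
--     "pyyamls":      "pyyaml",
--     "pyyyaml":      "pyyaml",
--     "reqeusts":     "requests",
--     "reqests":      "requests",
--     "rerquests":    "requests",
--     "urlib3":       "urllib3",
--     "urlllib3":     "urllib3",
--     "beautifulsupe": "beautifulsoup4",
--     "beautifulsoup-py3": "beautifulsoup4",
--     "dateutil":     "python-dateutil",  # ambiguous but often typosquat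
--     "tensorflow-gpu-2": "tensorflow",
--     "setup-tools":  "setuptools",
--     # npm historical
--     "loadash":      "lodash",
--     "lodahs":       "lodash",
--     "axioss":       "axios",
--     "axois":        "axios",
--     "reactt":       "react",
--     "raect":        "react",
--     "reactdom":     "react-dom",
--     "reaact":       "react",
--     "expres":       "express",
--     "expresss":     "express",
--     # Docker image typosquats
--     "postgress":    "postgres",
--     "postgre":      "postgres",
--     "ngnix":        "nginx",
--     "nginxx":       "nginx",
--     "myssql":       "mysql",
--     "mysq":         "mysql",
--     "redis-server": "redis",
--     "mongod":       "mongo",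
-- }
--
-- def _levenshtein(a: str, b: str) -> int:
--     """Standard Levenshtein distance. O(|a|*|b|)."""
--     if a == b:
--         return 0
--     if not a:
--         return len(b)
--     if not b:
--         return len(a)
--     prev = list(range(len(b) + 1))
--     for i, ca in enumerate(a, 1):
--         cur = [i]
--         for j, cb in enumerate(b, 1):
--             cur.append(
--                 min(cur[-1] + 1, prev[j] + 1, prev[j - 1] + (0 if ca == cb else 1))
--             )
--         prev = cur
--     return prev[-1]
--
-- def _normalize(pkg: str) -> str:
--     return pkg.strip().lower().replace("_", "-")
--
-- def is_typosquat(
--     pkg: str, legitimate: frozenset[str],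
-- ) -> tuple[bool, str | None]:
--     """Return ``(is_suspicious, canonical_if_known)``.
--
--     - Whitelisted name → ``(False, name)``
--     - Known typosquat → ``(True, canonical)``
--     - Levenshtein-1 from a whitelisted name AND length > 3 → ``(True, closest)``
--     - Unknown → ``(False, None)`` (do not flag)
--     """
--     if not pkg:
--         return (False, None)
--     norm = _normalize(pkg)
--     if norm in legitimate:
--         return (False, norm)
--     if norm in KNOWN_TYPOSQUATS:
--         return (True, KNOWN_TYPOSQUATS[norm])
--     # Fuzzy match: distance 1 from whitelist, only for names longer than
--     # 3 chars (prevents false positives on short names like "ws", "pg").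
--     if len(norm) > 3:
--         for legit in legitimate:
--             if abs(len(norm) - len(legit)) <= 1 and _levenshtein(norm, legit) == 1:
--                 return (True, legit)
--     return (False, None)
-- ===== SOURCE B (Python) =====
-- KNOWN_TYPOSQUATS: dict[str, str] = {
--     "pyyamls":      "pyyaml",
--     "pyyyaml":      "pyyaml",
--     "reqeusts":     "requests",
--     "reqests":      "requests",
--     "rerquests":    "requests",
--     "urlib3":       "urllib3",
--     "urlllib3":     "urllib3",
--     "beautifulsupe": "beautifulsoup4",
--     "beautifulsoup-py3": "beautifulsoup4",
--     "dateutil":     "python-dateutil",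
--     "tensorflow-gpu-2": "tensorflow",
--     "setup-tools":  "setuptools",
--     "loadash":      "lodash",
--     "lodahs":       "lodash",
--     "axioss":       "axios",
--     "axois":        "axios",
--     "reactt":       "react",
--     "raect":        "react",
--     "reactdom":     "react-dom",
--     "reaact":       "react",
--     "expres":       "express",
--     "expresss":     "express",
--     "postgress":    "postgres",
--     "postgre":      "postgres",
--     "ngnix":        "nginx",
--     "nginxx":       "nginx",
--     "myssql":       "mysql",
--     "mysq":         "mysql",
--     "redis-server": "redis",
--     "mongod":       "mongo",
-- }
--
--
-- def _normalize(pkg: str) -> str: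
--     return pkg.strip().lower().replace("_", "-")
--
--
-- def _dist_is_one(a: str, b: str) -> bool:
--     """Levenshtein distance == 1, decided directly without the DP table:
--     equal lengths -> exactly one mismatching position (one substitution);
--     lengths off by one -> deleting one char of the longer yields the shorter."""
--     if len(a) == len(b):
--         return sum(x != y for x, y in zip(a, b)) == 1
--     if len(a) < len(b):
--         a, b = b, a
--     if len(a) - len(b) != 1:
--         return False
--     i = 0
--     while i < len(b) and a[i] == b[i]:
--         i += 1
--     return a[i + 1:] == b[i:]
--
--
-- def is_typosquat(
--     pkg: str, legitimate: frozenset[str],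
-- ) -> tuple[bool, str | None]:
--     if not pkg:
--         return (False, None)
--     norm = _normalize(pkg)
--     if norm in legitimate:
--         return (False, norm)
--     if norm in KNOWN_TYPOSQUATS:
--         return (True, KNOWN_TYPOSQUATS[norm])
--     if len(norm) > 3:
--         for legit in legitimate:
--             if _dist_is_one(norm, legit):
--                 return (True, legit)
--     return (False, None)
-- ===== Notes on version B (the rewrite author's own statement) =====
-- stated objective: alternative
-- what changed: The per-candidate Levenshtein dynamic-programming table is replaced by a direct single-pass distance-exactly-1 test (equal lengths: exactly one mismatching position; lengths off by one: deleting one char of the longer after the common prefix yields the shorter), and the abs-length prefilter disappears.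
import Mathlib
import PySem

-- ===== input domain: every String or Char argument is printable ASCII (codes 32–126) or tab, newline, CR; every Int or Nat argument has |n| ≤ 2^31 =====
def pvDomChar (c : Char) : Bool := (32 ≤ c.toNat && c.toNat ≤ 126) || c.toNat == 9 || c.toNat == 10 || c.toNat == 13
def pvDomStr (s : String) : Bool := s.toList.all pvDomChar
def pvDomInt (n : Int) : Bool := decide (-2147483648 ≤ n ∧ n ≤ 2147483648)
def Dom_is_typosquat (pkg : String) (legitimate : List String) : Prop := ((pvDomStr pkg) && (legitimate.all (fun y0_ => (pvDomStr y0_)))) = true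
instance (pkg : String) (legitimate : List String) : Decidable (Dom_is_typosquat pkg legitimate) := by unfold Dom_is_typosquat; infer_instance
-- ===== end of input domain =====

-- ===== PORT A =====
-- One honest line: B replaces A's per-candidate Levenshtein DP table by a direct
-- distance-exactly-1 scan (one substitution / one deletion check); same results (alternative algorithm).

-- KNOWN_TYPOSQUATS (module constant, shared data of both versions)
def knownTyposquats : PySem.Dict String String := PySem.Dict.mk [
  ("pyyamls", "pyyaml"), ("pyyyaml", "pyyaml"), ("reqeusts", "requests"),
  ("reqests", "requests"), ("rerquests", "requests"), ("urlib3", "urllib3"),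
  ("urlllib3", "urllib3"), ("beautifulsupe", "beautifulsoup4"),
  ("beautifulsoup-py3", "beautifulsoup4"), ("dateutil", "python-dateutil"),
  ("tensorflow-gpu-2", "tensorflow"), ("setup-tools", "setuptools"),
  ("loadash", "lodash"), ("lodahs", "lodash"), ("axioss", "axios"),
  ("axois", "axios"), ("reactt", "react"), ("raect", "react"),
  ("reactdom", "react-dom"), ("reaact", "react"), ("expres", "express"),
  ("expresss", "express"), ("postgress", "postgres"), ("postgre", "postgres"),
  ("ngnix", "nginx"), ("nginxx", "nginx"), ("myssql", "mysql"),
  ("mysq", "mysql"), ("redis-server", "redis"), ("mongod", "mongo")]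

-- _normalize (identical helper in both Pythons)
def pyNormalize (pkg : String) : String :=
  PySem.Str.replace (PySem.Str.lower (PySem.Str.strip pkg)) "_" "-"

-- inner loop of _levenshtein: cur = [i]; for j, cb in enumerate(b, 1): cur.append(min(...))
def levInner (prev : List Int) (ca : Char) (i : Int) (bl : List Char) : List Int :=
  (bl.foldl (fun (st : List Int × Int) cb =>
      (st.1 ++ [min (min (PySem.List.pyGetD st.1 (-1) 0 + 1)
                         (PySem.List.pyGetD prev st.2 0 + 1))
                    (PySem.List.pyGetD prev (st.2 - 1) 0 + (if ca = cb then 0 else 1))],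
       st.2 + 1))
    ([i], 1)).1

-- _levenshtein
def pyLevenshtein (a b : String) : Int :=
  if a = b then 0
  else if a.toList = [] then (b.toList.length : Int)
  else if b.toList = [] then (a.toList.length : Int)
  else
    let bl := b.toList
    let prev0 : List Int := PySem.List.pyRange 0 ((bl.length : Int) + 1) 1
    let fin := (a.toList.foldl
        (fun (st : List Int × Int) ca => (levInner st.1 ca st.2 bl, st.2 + 1))
        (prev0, 1)).1
    PySem.List.pyGetD fin (-1) 0

-- the fuzzy-match for-loop of A (first match wins)
def fuzzyA (norm : String) : List String → Bool × Option String
  | [] => (false, none)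
  | legit :: rest =>
    if ((norm.toList.length : Int) - (legit.toList.length : Int)).natAbs ≤ 1
        ∧ pyLevenshtein norm legit = 1
    then (true, some legit) else fuzzyA norm rest

def is_typosquat (pkg : String) (legitimate : List String) : Bool × Option String :=
  if pkg = "" then (false, none)
  else
    let norm := pyNormalize pkg
    if legitimate.contains norm then (false, some norm)
    else
      match knownTyposquats.get? norm with
      | some canon => (true, some canon)
      | none =>
        if 3 < norm.toList.length then fuzzyA norm legitimate else (false, none)

-- ===== PORT B =====
-- while i < len(sh) and lng[i] == sh[i]: i += 1  /  return lng[i+1:] == sh[i:]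
def delCheck : List Char → List Char → Bool
  | lng, [] => lng.drop 1 = []
  | [], _ :: _ => false   -- unreachable under B's length guard (lng is the longer)
  | x :: lng, y :: sh => if x = y then delCheck lng sh else lng = y :: sh

-- _dist_is_one
def dist1 (a b : String) : Bool :=
  let al := a.toList
  let bl := b.toList
  if al.length = bl.length then
    ((al.zip bl).countP (fun p => p.1 ≠ p.2)) = 1
  else
    let p := if al.length < bl.length then (bl, al) else (al, bl)
    if p.1.length - p.2.length ≠ 1 then false
    else delCheck p.1 p.2

-- the fuzzy-match for-loop of B
def fuzzyB (norm : String) : List String → Bool × Option String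
  | [] => (false, none)
  | legit :: rest =>
    if dist1 norm legit then (true, some legit) else fuzzyB norm rest

def is_typosquat_alt (pkg : String) (legitimate : List String) : Bool × Option String :=
  if pkg = "" then (false, none)
  else
    let norm := pyNormalize pkg
    if legitimate.contains norm then (false, some norm)
    else
      match knownTyposquats.get? norm with
      | some canon => (true, some canon)
      | none =>
        if 3 < norm.toList.length then fuzzyB norm legitimate else (false, none)

-- ===== PRECONDITION & SPEC =====
def Spec_is_typosquat (pkg : String) (legitimate : List String) (out : Bool × Option String) : Prop := out = is_typosquat_alt pkg legitimate
instance (pkg : String) (legitimate : List String) (out : Bool × Option String) : Decidable (Spec_is_typosquat pkg legitimate out) := by unfold Spec_is_typosquat; infer_instance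

-- ===== CLAIM (what is proved, stated in full; the proofs are below) =====
def Claim_equal_is_typosquat : Prop := ∀ (pkg : String) (legitimate : List String), Dom_is_typosquat pkg legitimate → Spec_is_typosquat pkg legitimate (is_typosquat pkg legitimate)

-- ===== LEMMAS AND PROOFS =====

def lev : List Char → List Char → Nat
  | [], v => v.length
  | x :: u, [] => (x :: u).length
  | x :: u, y :: v =>
    min (lev u (y :: v) + 1) (min (lev (x :: u) v + 1) (lev u v + (if x = y then 0 else 1)))
termination_by u v => u.length + v.length
decreasing_by all_goals simp <;> omega

theorem lev_nil_left (v : List Char) : lev [] v = v.length := by cases v <;> simp [lev]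
theorem lev_nil_right (u : List Char) : lev u [] = u.length := by cases u <;> simp [lev]

theorem lev_eq_zero_iff (u : List Char) : ∀ v, lev u v = 0 ↔ u = v := by
  induction u with
  | nil => intro v; cases v <;> simp [lev]
  | cons x u ih =>
    intro v
    cases v with
    | nil => simp [lev]
    | cons y v =>
      by_cases hxy : x = y
      · subst hxy; simp [lev, Nat.min_eq_zero_iff, ih]
      · simp [lev, Nat.min_eq_zero_iff, ih, hxy]

theorem lev_le_cons_left (x : Char) (u v : List Char) : lev (x :: u) v ≤ 1 + lev u v := by
  cases v with
  | nil => simp [lev_nil_right]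
  | cons y v => simp only [lev]; omega

theorem lev_le_cons_right (y : Char) (u v : List Char) : lev u (y :: v) ≤ 1 + lev u v := by
  cases u with
  | nil => simp [lev_nil_left]
  | cons x u => simp only [lev]; omega

theorem le_lev_cons_left (x : Char) (v : List Char) : ∀ u, lev u v ≤ 1 + lev (x :: u) v := by
  induction v with
  | nil => intro u; simp [lev_nil_right]; omega
  | cons y v ih =>
    intro u
    have h2 : lev u v ≤ 1 + lev (x :: u) v := ih u
    have h3 : lev u (y :: v) ≤ 1 + lev u v := lev_le_cons_right y u v
    simp only [lev]; omega

theorem le_lev_cons_right (y : Char) (u : List Char) : ∀ v, lev u v ≤ 1 + lev u (y :: v) := by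
  induction u with
  | nil => intro v; simp [lev_nil_left]; omega
  | cons x u ih =>
    intro v
    have h2 : lev u v ≤ 1 + lev u (y :: v) := ih v
    have h3 : lev (x :: u) v ≤ 1 + lev u v := lev_le_cons_left x u v
    conv_rhs => rw [lev]
    cases v with
    | nil => simp only [lev_nil_right] at *; omega
    | cons z v => simp only [lev] at *; omega

theorem lev_cons_cons_same (x : Char) (u v : List Char) : lev (x :: u) (x :: v) = lev u v := by
  have h1 := le_lev_cons_right x u v
  have h2 := le_lev_cons_left x v u
  simp only [lev]; simp only [reduceIte]; omega

def Q (u v : List Char) : Prop :=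
  (u.length = v.length ∧ (u.zip v).countP (fun p => p.1 ≠ p.2) = 1)
  ∨ (u.length = v.length + 1 ∧ List.Sublist v u)
  ∨ (v.length = u.length + 1 ∧ List.Sublist u v)

theorem countP_zip_zero_iff (u : List Char) :
    ∀ v, u.length = v.length →
      (((u.zip v).countP (fun p => p.1 ≠ p.2)) = 0 ↔ u = v) := by
  induction u with
  | nil => intro v h; cases v <;> simp_all
  | cons x u ih =>
    intro v h
    cases v with
    | nil => simp at h
    | cons y v =>
      simp only [List.length_cons, Nat.add_right_cancel_iff] at h
      by_cases hxy : x = y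
      · subst hxy
        rw [List.zip_cons_cons, List.countP_cons_of_neg (by simp)]
        rw [ih v h]; simp
      · simp [hxy]

theorem sublist_cons_ne {x y : Char} {u v : List Char} (h : x ≠ y) :
    List.Sublist (y :: v) (x :: u) ↔ List.Sublist (y :: v) u := by
  constructor
  · intro hs
    cases hs with
    | cons _ hs => exact hs
    | cons₂ hs => exact absurd rfl h
  · intro hs; exact hs.cons x

theorem sublist_eq_of_succ {w z : List Char} (h : List.Sublist w z) (hl : z.length = w.length) : w = z :=
  (List.Sublist.length_eq h).mp hl.symm

theorem lev_eq_one_iff (u : List Char) : ∀ v, lev u v = 1 ↔ Q u v := by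
  induction u with
  | nil =>
    intro v
    rw [lev_nil_left]
    cases v with
    | nil => simp [Q]
    | cons y v => simp [Q, List.nil_sublist]
  | cons x u ih =>
    intro v
    cases v with
    | nil =>
      rw [lev_nil_right]
      simp [Q, List.nil_sublist]
    | cons y v =>
      by_cases hxy : x = y
      · subst hxy
        rw [lev_cons_cons_same, ih v]
        unfold Q
        simp only [List.length_cons, Nat.add_right_cancel_iff, List.cons_sublist_cons,
          List.zip_cons_cons, List.countP_cons]
        simp
      · have hlv : lev (x :: u) (y :: v) = 1 ↔ (u = y :: v ∨ x :: u = v ∨ u = v) := by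
          rw [lev, if_neg hxy,
            ← lev_eq_zero_iff u (y :: v), ← lev_eq_zero_iff (x :: u) v,
            ← lev_eq_zero_iff u v]
          omega
        rw [hlv]
        unfold Q
        constructor
        · rintro (h | h | h)
          · refine Or.inr (Or.inl ⟨by simp [h], ?_⟩)
            rw [h]
            exact List.sublist_cons_self x (y :: v)
          · refine Or.inr (Or.inr ⟨by simp [← h], ?_⟩)
            rw [← h]
            exact List.sublist_cons_self y (x :: u)
          · refine Or.inl ⟨by simp [h], ?_⟩
            rw [List.zip_cons_cons, List.countP_cons_of_pos (by simp [hxy]),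
              (countP_zip_zero_iff u v (by simp [h])).mpr h]
        · rintro (⟨hlen, hcnt⟩ | ⟨hlen, hsub⟩ | ⟨hlen, hsub⟩)
          · refine Or.inr (Or.inr ?_)
            simp only [List.length_cons, Nat.add_right_cancel_iff] at hlen
            rw [List.zip_cons_cons, List.countP_cons_of_pos (by simp [hxy])] at hcnt
            exact (countP_zip_zero_iff u v hlen).mp (by omega)
          · refine Or.inl ?_
            have h1 : List.Sublist (y :: v) u := (sublist_cons_ne hxy).mp hsub
            have h2 : u.length = (y :: v).length := by simp at hlen ⊢; omega
            exact (sublist_eq_of_succ h1 h2).symm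
          · refine Or.inr (Or.inl ?_)
            have h1 : List.Sublist (x :: u) v := (sublist_cons_ne (Ne.symm hxy)).mp hsub
            have h2 : v.length = (x :: u).length := by simp at hlen ⊢; omega
            exact sublist_eq_of_succ h1 h2

theorem Q_reverse (u v : List Char) : Q u.reverse v.reverse ↔ Q u v := by
  unfold Q
  have hz : ∀ (a b : List Char), a.length = b.length →
      (a.reverse.zip b.reverse).countP (fun p => p.1 ≠ p.2)
        = (a.zip b).countP (fun p => p.1 ≠ p.2) := by
    intro a b h
    rw [show a.reverse.zip b.reverse = (a.zip b).reverse by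
      simp [List.zip, ← List.reverse_zipWith h]]
    exact List.countP_reverse
  constructor
  · rintro (⟨h1, h2⟩ | ⟨h1, h2⟩ | ⟨h1, h2⟩)
    · exact Or.inl ⟨by simpa using h1, by rw [← hz u v (by simpa using h1)]; exact h2⟩
    · exact Or.inr (Or.inl ⟨by simpa using h1, by rw [← List.reverse_sublist]; exact h2⟩)
    · exact Or.inr (Or.inr ⟨by simpa using h1, by rw [← List.reverse_sublist]; exact h2⟩)
  · rintro (⟨h1, h2⟩ | ⟨h1, h2⟩ | ⟨h1, h2⟩)
    · exact Or.inl ⟨by simpa using h1, by rw [hz u v h1]; exact h2⟩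
    · exact Or.inr (Or.inl ⟨by simpa using h1, List.reverse_sublist.mpr h2⟩)
    · exact Or.inr (Or.inr ⟨by simpa using h1, List.reverse_sublist.mpr h2⟩)

theorem delCheck_iff (sh : List Char) : ∀ lng : List Char, lng.length = sh.length + 1 →
    (delCheck lng sh = true ↔ List.Sublist sh lng) := by
  induction sh with
  | nil =>
    intro lng h
    cases lng with
    | nil => simp at h
    | cons x l =>
      simp only [List.length_cons, List.length_nil] at h
      have hl : l = [] := List.length_eq_zero_iff.mp (by omega)
      subst hl
      simp [delCheck]
  | cons y sh ih =>
    intro lng h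
    cases lng with
    | nil => simp only [List.length_nil, List.length_cons] at h; omega
    | cons x l =>
      simp only [List.length_cons, Nat.add_right_cancel_iff] at h
      by_cases hxy : x = y
      · subst hxy
        rw [show delCheck (x :: l) (x :: sh) = delCheck l sh from by simp [delCheck]]
        rw [ih l h, List.cons_sublist_cons]
      · rw [show delCheck (x :: l) (y :: sh) = decide (l = y :: sh) from by
          simp [delCheck, hxy]]
        rw [sublist_cons_ne hxy, decide_eq_true_eq]
        constructor
        · intro hd; rw [hd]
        · intro hs
          exact (sublist_eq_of_succ hs (by simp; omega)).symm

theorem dist1_iff_Q (a b : String) : dist1 a b = true ↔ Q a.toList b.toList := by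
  by_cases h1 : a.toList.length = b.toList.length
  · rw [show dist1 a b = decide (((a.toList.zip b.toList).countP (fun p => p.1 ≠ p.2)) = 1)
      from by simp [dist1, h1]]
    rw [decide_eq_true_eq]
    constructor
    · intro hc; exact Or.inl ⟨h1, hc⟩
    · rintro (⟨-, hc⟩ | ⟨hl, -⟩ | ⟨hl, -⟩)
      · exact hc
      · omega
      · omega
  · by_cases h2 : a.toList.length < b.toList.length
    · by_cases h3 : b.toList.length = a.toList.length + 1
      · rw [show dist1 a b = delCheck b.toList a.toList from by
          simp [dist1, h3]]
        rw [delCheck_iff _ _ h3]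
        constructor
        · intro hs; exact Or.inr (Or.inr ⟨h3, hs⟩)
        · rintro (⟨hl, -⟩ | ⟨hl, -⟩ | ⟨-, hs⟩)
          · omega
          · omega
          · exact hs
      · rw [show dist1 a b = false from by
          simp only [dist1, if_neg h1, if_pos h2]
          rw [if_pos (by omega)]]
        simp only [Bool.false_eq_true, false_iff]
        rintro (⟨hl, -⟩ | ⟨hl, -⟩ | ⟨hl, -⟩) <;> omega
    · by_cases h3 : a.toList.length = b.toList.length + 1
      · rw [show dist1 a b = delCheck a.toList b.toList from by
          simp [dist1, h3]]
        rw [delCheck_iff _ _ h3]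
        constructor
        · intro hs; exact Or.inr (Or.inl ⟨h3, hs⟩)
        · rintro (⟨hl, -⟩ | ⟨-, hs⟩ | ⟨hl, -⟩)
          · omega
          · exact hs
          · omega
      · rw [show dist1 a b = false from by
          simp only [dist1, if_neg h1, if_neg h2]
          rw [if_pos (by omega)]]
        simp only [Bool.false_eq_true, false_iff]
        rintro (⟨hl, -⟩ | ⟨hl, -⟩ | ⟨hl, -⟩) <;> omega


def cellF (bl ru : List Char) (j : Nat) : Int := ((lev ru ((bl.take j).reverse) : Nat) : Int)

def cellRow (bl ru : List Char) : List Int := (List.range (bl.length + 1)).map (cellF bl ru)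

theorem getD_cellRow (bl ru : List Char) (j : Nat) (hj : j < bl.length + 1) :
    PySem.List.pyGetD (cellRow bl ru) (j : Int) 0 = cellF bl ru j := by
  rw [PySem.List.pyGetD_natCast]
  exact PySem.List.getD_map_range _ _ _ _ hj

theorem levInner_go (ca : Char) (ru bl : List Char) :
    ∀ (s : List Char) (t : Nat), s = bl.drop t → t ≤ bl.length →
    List.foldl (fun (st : List Int × Int) cb =>
      (st.1 ++ [min (min (PySem.List.pyGetD st.1 (-1) 0 + 1)
                         (PySem.List.pyGetD (cellRow bl ru) st.2 0 + 1))
                    (PySem.List.pyGetD (cellRow bl ru) (st.2 - 1) 0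
                      + (if ca = cb then 0 else 1))],
       st.2 + 1))
      (((List.range (t+1)).map (cellF bl (ca :: ru)), ((t : Int) + 1)))
      s
    = (cellRow bl (ca :: ru), (bl.length : Int) + 1) := by
  intro s
  induction s with
  | nil =>
    intro t hs ht
    have hge : bl.length ≤ t := List.drop_eq_nil_iff.mp hs.symm
    have ht' : t = bl.length := le_antisymm ht hge
    subst ht'
    simp [cellRow]
  | cons cb s' ih =>
    intro t hs ht
    have htl : t < bl.length := by
      rcases Nat.lt_or_ge t bl.length with h | h
      · exact h
      · rw [List.drop_eq_nil_iff.mpr h] at hs; exact absurd hs (by simp)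
    have hcb : bl[t]? = some cb := by
      have h0 : (bl.drop t)[0]? = some cb := by rw [← hs]; rfl
      rwa [List.getElem?_drop, Nat.add_zero] at h0
    have hs' : s' = bl.drop (t + 1) := by
      have : bl.drop (t + 1) = (bl.drop t).drop 1 := by
        rw [List.drop_drop]
      rw [this, ← hs, List.drop_one, List.tail_cons]
    have hw : (bl.take (t+1)).reverse = cb :: (bl.take t).reverse := by
      rw [List.take_add_one, hcb]
      simp
    rw [List.foldl_cons]
    have e_last : PySem.List.pyGetD ((List.range (t+1)).map (cellF bl (ca :: ru))) (-1) 0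
        = cellF bl (ca :: ru) t := by
      rw [List.range_succ, List.map_append]
      exact PySem.List.pyGetD_neg_one_append_singleton _ _ _
    have e_pj : PySem.List.pyGetD (cellRow bl ru) ((t : Int) + 1) 0 = cellF bl ru (t+1) := by
      rw [show (t : Int) + 1 = ((t + 1 : Nat) : Int) by push_cast; ring]
      exact getD_cellRow _ _ _ (by omega)
    have e_pj1 : PySem.List.pyGetD (cellRow bl ru) ((t : Int) + 1 - 1) 0 = cellF bl ru t := by
      rw [show (t : Int) + 1 - 1 = ((t : Nat) : Int) by ring]
      exact getD_cellRow _ _ _ (by omega)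
    have e_cell : min (min (cellF bl (ca :: ru) t + 1) (cellF bl ru (t+1) + 1))
        (cellF bl ru t + (if ca = cb then 0 else 1)) = cellF bl (ca :: ru) (t+1) := by
      unfold cellF
      rw [hw, lev]
      push_cast
      by_cases hc : ca = cb
      · simp only [if_pos hc]
        -- casts already pushed
        omega
      · simp only [if_neg hc]
        -- casts already pushed
        omega
    simp only [e_last, e_pj, e_pj1, e_cell]
    rw [show ((List.range (t+1)).map (cellF bl (ca :: ru)) ++ [cellF bl (ca :: ru) (t+1)])
        = (List.range (t+1+1)).map (cellF bl (ca :: ru)) by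
      simp [List.range_succ]]
    have := ih (t+1) hs' (by omega)
    rw [show (t : Int) + 1 + 1 = ((t + 1 : Nat) : Int) + 1 by push_cast; ring]
    exact this

theorem levInner_eq (ca : Char) (ru bl : List Char) :
    levInner (cellRow bl ru) ca ((ru.length : Int) + 1) bl = cellRow bl (ca :: ru) := by
  unfold levInner
  have hgo := levInner_go ca ru bl bl 0 rfl (by omega)
  rw [show (([((ru.length : Int) + 1)], (1 : Int)) : List Int × Int)
      = ((List.range (0+1)).map (cellF bl (ca :: ru)), ((0 : Nat) : Int) + 1) from by
    simp [cellF, lev_nil_right]]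
  rw [hgo]

theorem outer_go (bl : List Char) :
    ∀ (s ru : List Char),
    List.foldl (fun (st : List Int × Int) ca => (levInner st.1 ca st.2 bl, st.2 + 1))
      (cellRow bl ru, (ru.length : Int) + 1) s
    = (cellRow bl (s.reverse ++ ru), ((s.reverse ++ ru).length : Int) + 1) := by
  intro s
  induction s with
  | nil => intro ru; simp
  | cons ca s' ih =>
    intro ru
    rw [List.foldl_cons, levInner_eq]
    rw [show (ru.length : Int) + 1 + 1 = (((ca :: ru).length : Nat) : Int) + 1 by push_cast [List.length_cons]; ring]
    rw [ih (ca :: ru)]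
    simp [List.reverse_cons, List.append_assoc]

theorem pyLevenshtein_eq (a b : String) :
    pyLevenshtein a b = (lev a.toList.reverse b.toList.reverse : Int) := by
  unfold pyLevenshtein
  by_cases hab : a = b
  · rw [if_pos hab, hab, (lev_eq_zero_iff _ _).mpr rfl]
    simp
  · rw [if_neg hab]
    by_cases ha : a.toList = []
    · rw [if_pos ha, ha]
      simp [lev_nil_left]
    · rw [if_neg ha]
      by_cases hb : b.toList = []
      · rw [if_pos hb, hb]
        simp [lev_nil_right]
      · rw [if_neg hb]
        dsimp only
        have hinit : PySem.List.pyRange 0 ((b.toList.length : Int) + 1) 1 = cellRow b.toList [] := by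
          rw [PySem.List.pyRange_one]
          unfold cellRow
          rw [show (((b.toList.length : Int) + 1) - 0).toNat = b.toList.length + 1 by omega]
          refine List.map_congr_left ?_
          intro j hj
          rw [List.mem_range] at hj
          unfold cellF
          rw [lev_nil_left]
          simp only [List.length_reverse, List.length_take]
          omega
        have hgo := outer_go b.toList a.toList []
        simp only [List.length_nil, Nat.cast_zero, zero_add, List.append_nil] at hgo
        rw [hinit, hgo]
        unfold cellRow
        rw [List.range_succ, List.map_append]
        dsimp only [List.map_cons, List.map_nil]
        rw [PySem.List.pyGetD_neg_one_append_singleton]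
        unfold cellF
        rw [List.take_length]

theorem cond_iff (a b : String) :
    (((a.toList.length : Int) - (b.toList.length : Int)).natAbs ≤ 1
        ∧ pyLevenshtein a b = 1)
      ↔ dist1 a b = true := by
  rw [dist1_iff_Q, ← Q_reverse, ← lev_eq_one_iff, pyLevenshtein_eq]
  constructor
  · rintro ⟨-, h⟩
    exact_mod_cast h
  · intro h
    have h1 : lev a.toList.reverse b.toList.reverse = 1 := h
    have h2 := (lev_eq_one_iff _ _).mp h1
    refine ⟨?_, by exact_mod_cast h1⟩
    rcases h2 with ⟨hl, -⟩ | ⟨hl, -⟩ | ⟨hl, -⟩ <;> simp only [List.length_reverse] at hl <;> omega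

theorem fuzzy_eq (norm : String) (l : List String) : fuzzyA norm l = fuzzyB norm l := by
  induction l with
  | nil => rfl
  | cons legit rest ih =>
    simp only [fuzzyA, fuzzyB, ih]
    by_cases h : dist1 norm legit = true
    · rw [if_pos ((cond_iff norm legit).mpr h), if_pos h]
    · rw [if_neg (fun hc => h ((cond_iff norm legit).mp hc)), if_neg h]

-- ===== VERDICT (by name: the statement is the Claim_ definition above) =====
theorem is_typosquat_spec : Claim_equal_is_typosquat := by
  intro pkg legitimate _
  unfold Spec_is_typosquat is_typosquat is_typosquat_alt
  simp only [fuzzy_eq]
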